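-- pv_equiv track=rewrite | github.com/sagastya1/cbdc-besu-benchmark | cbdc-benchmark/scripts/bootstrap-network.py | build_qbft_extra_data
-- ===== SOURCE A (Python) =====
-- def build_qbft_extra_data(validator_addresses: list) -> str:
--     """
--     QBFT uses RLP-encoded extra data.
--     Format: RLP([vanity, [validators], votes, round, seals])
--     Using a simplified valid encoding for genesis.
--     """
--     # For genesis, use Besu's standard QBFT extra data format
--     # We use a pre-computed valid RLP structure
--     vanity = "00" * 32
--     num_validators = len(validator_addresses)
--
--     # Build RLP manually for simple case
--     def rlp_encode_address(addr):
--         raw = bytes.fromhex(addr.replace("0x", "").lower())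
--         return bytes([0x94]) + raw  # 0x94 = 0x80 + 20 (length of address)
--
--     def rlp_encode_list(items_bytes):
--         total = sum(len(i) for i in items_bytes)
--         if total <= 55:
--             return bytes([0xc0 + total]) + b"".join(items_bytes)
--         else:
--             length_bytes = total.to_bytes((total.bit_length() + 7) // 8, "big")
--             return bytes([0xf7 + len(length_bytes)]) + length_bytes + b"".join(items_bytes)
--
--     validator_rlp = [rlp_encode_address(addr) for addr in validator_addresses]
--     validators_list = rlp_encode_list(validator_rlp)
--
--     # vanity (32 bytes as RLP string)
--     vanity_bytes = bytes(32)
--     vanity_rlp = bytes([0xa0]) + vanity_bytes  # 0xa0 = 0x80 + 32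
--
--     # empty votes, round=0, empty seals
--     empty_list = bytes([0xc0])
--     round_rlp = bytes([0x80])  # RLP empty = round 0
--
--     outer = rlp_encode_list([vanity_rlp, validators_list, empty_list, round_rlp, empty_list])
--     return "0x" + outer.hex()
-- ===== SOURCE B (Python) =====
-- def build_qbft_extra_data(validator_addresses: list) -> str:
--     # Build the nested genesis structure once, with every leaf a pre-framed RLP
--     # item (0xa0 + 32-byte vanity, 0x94 + 20-byte address frame, 0x80 = round 0),
--     # then serialise it with one recursive encoder: a bytes leaf is emitted as-is,
--     # a list is the wrapped concatenation of its recursively encoded children.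
--     def rlp(node):
--         if isinstance(node, bytes):
--             return node
--         payload = b"".join(rlp(child) for child in node)
--         n = len(payload)
--         if n <= 55:
--             return bytes([0xC0 + n]) + payload
--         lb = n.to_bytes((n.bit_length() + 7) // 8, "big")
--         return bytes([0xF7 + len(lb)]) + lb + payload
--
--     validators = [b"\x94" + bytes.fromhex(a.replace("0x", "").lower())
--                   for a in validator_addresses]
--     tree = [b"\xa0" + bytes(32), validators, [], b"\x80", []]
--     return "0x" + rlp(tree).hex()
-- ===== Notes on version B (the rewrite author's own statement) =====
-- stated objective: simpler
-- what changed: B builds the nested genesis structure [vanity,[validators],votes,round,seals] once and serialises it with a single recursive RLP encoder, replacing A's staged pipeline of per-kind helper encoders and intermediate variables; Pre_ excludes only the inputs where A raises ValueError in bytes.fromhex (invalid hex in an address), where B raises too.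
import Mathlib
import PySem

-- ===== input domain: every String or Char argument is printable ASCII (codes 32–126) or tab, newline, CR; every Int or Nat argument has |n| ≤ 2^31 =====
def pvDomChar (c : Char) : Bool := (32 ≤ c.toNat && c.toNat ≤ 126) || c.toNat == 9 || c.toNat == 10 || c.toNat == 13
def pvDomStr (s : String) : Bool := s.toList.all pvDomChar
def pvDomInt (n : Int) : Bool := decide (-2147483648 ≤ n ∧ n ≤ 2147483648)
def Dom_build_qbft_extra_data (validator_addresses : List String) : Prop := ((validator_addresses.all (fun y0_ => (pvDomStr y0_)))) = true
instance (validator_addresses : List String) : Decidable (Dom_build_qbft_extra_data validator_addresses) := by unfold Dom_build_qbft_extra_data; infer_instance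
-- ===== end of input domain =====

-- B builds the nested genesis structure once and serialises it with one recursive RLP
-- encoder, replacing A's staged per-kind helper encoders — objective: simpler.
-- Equivalence is proved on Pre_ (valid hex addresses), where both Pythons return.

-- Shared stdlib models (used by BOTH ports): hex digits of a byte (bytes.hex()),
-- bytes.fromhex, and n.to_bytes(k, "big").
def pvHexDigit (n : Nat) : Char := if n < 10 then Char.ofNat (48 + n) else Char.ofNat (87 + n)
def pvHexByte (b : Nat) : List Char := [pvHexDigit (b / 16), pvHexDigit (b % 16)]

-- hex value of a char as bytes.fromhex reads it; both Pythons call fromhex only on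
-- .lower()ed strings, so the lowercase-only table is exact at its callsites.
def pvHexVal? (c : Char) : Option Nat :=
  if '0' ≤ c ∧ c ≤ '9' then some (c.toNat - 48)
  else if 'a' ≤ c ∧ c ≤ 'f' then some (c.toNat - 87)
  else none

-- bytes.fromhex: skip whitespace between byte pairs, read two hex digits at a time;
-- none = ValueError (exact on the ASCII domain).
def pvFromhex : List Char → Option (List Nat)
  | [] => some []
  | c :: rest =>
    if PySem.Chars.isspace c then pvFromhex rest
    else
      match rest with
      | c2 :: rest2 =>
        match pvHexVal? c, pvHexVal? c2 with
        | some v1, some v2 => (pvFromhex rest2).map (fun t => (16 * v1 + v2) :: t)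
        | _, _ => none
      | [] => none

-- n.to_bytes(k, "big")
def pvToBytesBE : Nat → Nat → List Nat
  | _, 0 => []
  | n, k + 1 => pvToBytesBE (n / 256) k ++ [n % 256]

-- ===== PORT A =====
-- def rlp_encode_address(addr); none where fromhex raises ValueError
def pvRlpEncodeAddress? (addr : String) : Option (List Nat) :=
  (pvFromhex (PySem.Str.lower (PySem.Str.replace addr "0x" "")).toList).map
    (fun raw => 0x94 :: raw)

-- def rlp_encode_list(items_bytes)
def pvRlpEncodeList (items : List (List Nat)) : List Nat :=
  let total := items.foldl (fun acc i => acc + i.length) 0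
  if total ≤ 55 then (0xc0 + total) :: items.flatten
  else
    let lengthBytes := pvToBytesBE total ((PySem.Int.bitLength (total : Int) + 7) / 8)
    ((0xf7 + lengthBytes.length) :: lengthBytes) ++ items.flatten

-- port of A (the unused locals vanity / num_validators are omitted); "" is unreachable
-- under Pre_ (it stands for the ValueError bytes.fromhex raises)
def build_qbft_extra_data (validator_addresses : List String) : String :=
  match validator_addresses.mapM pvRlpEncodeAddress? with
  | none => ""
  | some validator_rlp =>
    let validators_list := pvRlpEncodeList validator_rlp
    let vanity_bytes : List Nat := List.replicate 32 0
    let vanity_rlp : List Nat := 0xa0 :: vanity_bytes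
    let empty_list : List Nat := [0xc0]
    let round_rlp : List Nat := [0x80]
    let outer := pvRlpEncodeList [vanity_rlp, validators_list, empty_list, round_rlp, empty_list]
    "0x" ++ String.ofList (outer.flatMap pvHexByte)

-- ===== PORT B =====
-- the nested structure rlp() recurses over: bytes leaves (pre-framed RLP items) and
-- lists of nodes (explicit child-list type, no nested inductive)
mutual
inductive PvRlp : Type
  | raw : List Nat → PvRlp
  | list : PvRlps → PvRlp
inductive PvRlps : Type
  | nil : PvRlps
  | cons : PvRlp → PvRlps → PvRlps
end

-- def rlp(node); the b"".join over children is the mutual pvRlpPayload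
mutual
def pvRlpEnc : PvRlp → List Nat
  | .raw node => node
  | .list node =>
    let payload := pvRlpPayload node
    let n := payload.length
    if n ≤ 55 then (0xC0 + n) :: payload
    else
      let lb := pvToBytesBE n ((PySem.Int.bitLength (n : Int) + 7) / 8)
      ((0xF7 + lb.length) :: lb) ++ payload
def pvRlpPayload : PvRlps → List Nat
  | .nil => []
  | .cons x xs => pvRlpEnc x ++ pvRlpPayload xs
end

-- b"\x94" + bytes.fromhex(a.replace("0x", "").lower()); none = ValueError
def pvValidatorItem? (a : String) : Option (List Nat) :=
  (pvFromhex (PySem.Str.lower (PySem.Str.replace a "0x" "")).toList).map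
    (fun raw => 0x94 :: raw)

-- a Python list literal of nodes, as PvRlps
def pvNodesOf (l : List PvRlp) : PvRlps := l.foldr PvRlps.cons .nil

-- "" is unreachable under Pre_ (it stands for the ValueError bytes.fromhex raises)
def build_qbft_extra_data_alt (validator_addresses : List String) : String :=
  match validator_addresses.mapM pvValidatorItem? with
  | none => ""
  | some validators =>
    let tree : PvRlp := .list (pvNodesOf
      [.raw (0xa0 :: List.replicate 32 0), .list (pvNodesOf (validators.map PvRlp.raw)),
       .list .nil, .raw [0x80], .list .nil])
    "0x" ++ String.ofList ((pvRlpEnc tree).flatMap pvHexByte)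

-- ===== PRECONDITION & SPEC =====
-- a valid bytes.fromhex argument: every char a hex digit or whitespace, an even number
-- of digits in total, and whitespace only at even digit offsets (between byte pairs)
def pvValidHex (h : List Char) : Bool :=
  h.all (fun c => PySem.Chars.isspace c || (pvHexVal? c).isSome) &&
  (h.countP (fun c => !PySem.Chars.isspace c)) % 2 == 0 &&
  (List.range h.length).all (fun i =>
    !PySem.Chars.isspace h[i]! ||
    ((h.take i).countP (fun c => !PySem.Chars.isspace c)) % 2 == 0)

-- Pre_ excludes exactly the inputs where both Pythons raise ValueError in bytes.fromhex
def Pre_build_qbft_extra_data (validator_addresses : List String) : Prop :=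
  ∀ a ∈ validator_addresses,
    pvValidHex (PySem.Str.lower (PySem.Str.replace a "0x" "")).toList = true
instance (validator_addresses : List String) : Decidable (Pre_build_qbft_extra_data validator_addresses) := by unfold Pre_build_qbft_extra_data; infer_instance

def pvWitness_build_qbft_extra_data : List String := ["0xAb 12", "d9ff00"]

def Spec_build_qbft_extra_data (validator_addresses : List String) (out : String) : Prop := out = build_qbft_extra_data_alt validator_addresses
instance (validator_addresses : List String) (out : String) : Decidable (Spec_build_qbft_extra_data validator_addresses out) := by unfold Spec_build_qbft_extra_data; infer_instance

-- ===== CLAIM (what is proved, stated in full; the proofs are below) =====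
def Claim_equal_build_qbft_extra_data : Prop := ∀ (validator_addresses : List String), Dom_build_qbft_extra_data validator_addresses → Pre_build_qbft_extra_data validator_addresses → Spec_build_qbft_extra_data validator_addresses (build_qbft_extra_data validator_addresses)

-- ===== LEMMAS AND PROOFS =====

-- the two address pipelines are the same fromhex call with the same frame byte
lemma pvAddress_eq : pvRlpEncodeAddress? = pvValidatorItem? := rfl

-- the list-wrapping step both encoders perform, factored out for the proof
def pvWrapFn (payload : List Nat) : List Nat :=
  let n := payload.length
  if n ≤ 55 then (0xC0 + n) :: payload
  else
    let lb := pvToBytesBE n ((PySem.Int.bitLength (n : Int) + 7) / 8)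
    ((0xF7 + lb.length) :: lb) ++ payload

lemma pvRlpEnc_list (ns : PvRlps) : pvRlpEnc (.list ns) = pvWrapFn (pvRlpPayload ns) := rfl

-- items_bytes.foldl length sum = length of the joined payload
lemma pvFoldl_len (items : List (List Nat)) :
    items.foldl (fun acc i => acc + i.length) 0 = items.flatten.length := by
  suffices h : ∀ a : Nat, items.foldl (fun acc i => acc + i.length) a = a + items.flatten.length by
    simpa using h 0
  induction items with
  | nil => simp
  | cons x xs ih =>
    intro a
    simp only [List.foldl_cons, ih, List.flatten_cons, List.length_append]
    omega

-- A's rlp_encode_list is the same wrapping of the joined items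
lemma pvRlpEncodeList_eq (items : List (List Nat)) :
    pvRlpEncodeList items = pvWrapFn items.flatten := by
  unfold pvRlpEncodeList pvWrapFn
  rw [pvFoldl_len]

-- the payload of a literal child list is the concatenation of the encoded children
lemma pvRlpPayload_ofList (l : List PvRlp) :
    pvRlpPayload (pvNodesOf l) = (l.map pvRlpEnc).flatten := by
  induction l with
  | nil => rfl
  | cons x xs ih =>
    show pvRlpEnc x ++ pvRlpPayload (pvNodesOf xs) = _
    rw [ih]; rfl

-- raw leaves are emitted as-is, so their joined payload is the items joined
lemma pvRlpPayload_raws (items : List (List Nat)) :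
    pvRlpPayload (pvNodesOf (items.map PvRlp.raw)) = items.flatten := by
  induction items with
  | nil => rfl
  | cons x xs ih =>
    show pvRlpEnc (.raw x) ++ pvRlpPayload (pvNodesOf (xs.map PvRlp.raw)) = _
    rw [ih]; rfl

-- ===== VERDICT (by name: the statement is the Claim_ definition above) =====
theorem build_qbft_extra_data_spec : Claim_equal_build_qbft_extra_data := by
  intro xs _hdom _hpre
  unfold Spec_build_qbft_extra_data build_qbft_extra_data build_qbft_extra_data_alt
  rw [← pvAddress_eq]
  cases hm : xs.mapM pvRlpEncodeAddress? with
  | none => rfl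
  | some validators =>
    dsimp only
    congr 2
    rw [pvRlpEnc_list, pvRlpPayload_ofList]
    simp only [List.map_cons, List.map_nil, pvRlpEnc_list, pvRlpPayload_raws]
    rw [pvRlpEncodeList_eq, pvRlpEncodeList_eq]
    rfl
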